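-- pv_equiv track=rewrite | github.com/leolivares/leolivares | Intro Progra/Tarea 1/tarea01_86451-K.py | letras_validas
-- ===== SOURCE A (Python) =====
-- def letras_validas(palabra,pozo) :
--     if len(palabra) <= len(pozo) :
--         cont = 0
--         abc = "ABCEDFGHIJKLMNOPQRSTUVWXYZ"
--         for letra in abc :
--             a = pozo.count(letra)
--             b = palabra.count(letra)
--             if b > a :
--                 cont += 1
--         if cont != 0 :
--             letrasvalidas = False
--         else :
--             letrasvalidas = True
--     else :
--         letrasvalidas = False
--     return letrasvalidas
-- ===== SOURCE B (Python) =====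
-- def letras_validas(palabra, pozo):
--     # One pass builds a letter-count index of palabra; then each DISTINCT letter
--     # (only uppercase A-Z, as the original alphabet) is checked against pozo once.
--     if len(palabra) > len(pozo):
--         return False
--     need = {}
--     for ch in palabra:
--         need[ch] = need.get(ch, 0) + 1
--     return all(n <= pozo.count(ch)
--                for ch, n in need.items() if 'A' <= ch <= 'Z')
-- ===== Notes on version B (the rewrite author's own statement) =====
-- stated objective: alternative
-- what changed: Instead of scanning a fixed 26-letter alphabet and counting palabra once per alphabet letter, B builds a count index of palabra in one pass and checks only the distinct uppercase letters actually present in palabra against pozo.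
import Mathlib
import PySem

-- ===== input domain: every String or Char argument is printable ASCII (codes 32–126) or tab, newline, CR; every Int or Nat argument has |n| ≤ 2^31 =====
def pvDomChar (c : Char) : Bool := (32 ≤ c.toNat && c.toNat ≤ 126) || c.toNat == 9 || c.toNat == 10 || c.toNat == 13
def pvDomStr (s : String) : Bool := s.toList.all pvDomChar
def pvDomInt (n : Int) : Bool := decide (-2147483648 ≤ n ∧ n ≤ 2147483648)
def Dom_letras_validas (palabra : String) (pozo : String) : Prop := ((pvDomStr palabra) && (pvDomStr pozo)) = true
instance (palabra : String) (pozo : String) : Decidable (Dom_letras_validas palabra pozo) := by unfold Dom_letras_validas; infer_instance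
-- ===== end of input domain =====

-- B replaces A's fixed 26-letter alphabet scan (two .count scans per alphabet letter) by a
-- one-pass count index of palabra checked only at palabra's distinct uppercase letters (objective: alternative).

-- ===== PORT A =====
def letras_validas (palabra : String) (pozo : String) : Bool :=
  if PySem.Str.len palabra ≤ PySem.Str.len pozo then
    let cont : Int :=
      ("ABCEDFGHIJKLMNOPQRSTUVWXYZ").toList.foldl (fun cont letra =>
        let a := PySem.Str.count pozo (String.ofList [letra])
        let b := PySem.Str.count palabra (String.ofList [letra])
        if b > a then cont + 1 else cont) 0
    if cont ≠ 0 then false else true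
  else false

-- ===== PORT B =====
def letras_validas_alt (palabra : String) (pozo : String) : Bool :=
  if PySem.Str.len palabra > PySem.Str.len pozo then false
  else
    let need : PySem.Dict Char Int :=
      palabra.toList.foldl (fun d ch => d.insert ch (d.getD ch 0 + 1)) PySem.Dict.empty
    (need.items.filter (fun p => decide ('A' ≤ p.1) && decide (p.1 ≤ 'Z'))).all
      (fun p => decide (p.2 ≤ (PySem.Str.count pozo (String.ofList [p.1]) : Int)))

-- ===== PRECONDITION & SPEC =====
def Spec_letras_validas (palabra : String) (pozo : String) (out : Bool) : Prop := out = letras_validas_alt palabra pozo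
instance (palabra : String) (pozo : String) (out : Bool) : Decidable (Spec_letras_validas palabra pozo out) := by unfold Spec_letras_validas; infer_instance

-- ===== CLAIM (what is proved, stated in full; the proofs are below) =====
def Claim_equal_letras_validas : Prop := ∀ (palabra : String) (pozo : String), Dom_letras_validas palabra pozo → Spec_letras_validas palabra pozo (letras_validas palabra pozo)

-- ===== LEMMAS AND PROOFS =====

def abcLit : List Char := ['A','B','C','E','D','F','G','H','I','J','K','L','M','N','O','P','Q','R','S','T','U','V','W','X','Y','Z']

lemma abc_eq : "ABCEDFGHIJKLMNOPQRSTUVWXYZ".toList = abcLit := rfl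

-- Python's s.count(sub) for a one-character sub is the character count.
lemma go_singleton (c : Char) : ∀ (fuel : Nat) (s : List Char) (acc : Nat), s.length ≤ fuel →
    PySem.Chars.count.go [c] fuel s acc = acc + s.count c := by
  intro fuel
  induction fuel with
  | zero =>
    intro s acc h
    have : s = [] := List.length_eq_zero_iff.mp (Nat.le_zero.mp h)
    subst this; simp [PySem.Chars.count.go]
  | succ n ih =>
    intro s acc h
    cases s with
    | nil => simp [PySem.Chars.count.go]
    | cons a t =>
      simp only [List.length_cons, Nat.add_le_add_iff_right] at h
      by_cases hc : c = a
      · subst hc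
        simp [PySem.Chars.count.go, ih t _ h, List.count_cons]
        omega
      · simp [PySem.Chars.count.go, hc, ih t _ h, List.count_cons]
        exact fun e => hc e.symm

lemma count_singleton (cs : List Char) (c : Char) : PySem.Chars.count cs [c] = cs.count c := by
  simp [PySem.Chars.count, go_singleton c cs.length cs 0 (Nat.le_refl _)]

lemma upper_of_mem_abc : ∀ c ∈ abcLit, 'A' ≤ c ∧ c ≤ 'Z' := by
  intro c hc
  simp only [abcLit, List.mem_cons, List.not_mem_nil, or_false] at hc
  rcases hc with rfl|rfl|rfl|rfl|rfl|rfl|rfl|rfl|rfl|rfl|rfl|rfl|rfl|rfl|rfl|rfl|rfl|rfl|rfl|rfl|rfl|rfl|rfl|rfl|rfl|rfl <;>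
    exact ⟨by decide, by decide⟩

lemma mem_abc (c : Char) (h1 : 'A' ≤ c) (h2 : c ≤ 'Z') : c ∈ abcLit := by
  have h1' : 65 ≤ c.toNat := h1
  have h2' : c.toNat ≤ 90 := h2
  have hc := (Char.ofNat_toNat c).symm
  have hd : c.toNat = 65 ∨ c.toNat = 66 ∨ c.toNat = 67 ∨ c.toNat = 68 ∨ c.toNat = 69 ∨ c.toNat = 70 ∨ c.toNat = 71 ∨ c.toNat = 72 ∨ c.toNat = 73 ∨ c.toNat = 74 ∨ c.toNat = 75 ∨ c.toNat = 76 ∨ c.toNat = 77 ∨ c.toNat = 78 ∨ c.toNat = 79 ∨ c.toNat = 80 ∨ c.toNat = 81 ∨ c.toNat = 82 ∨ c.toNat = 83 ∨ c.toNat = 84 ∨ c.toNat = 85 ∨ c.toNat = 86 ∨ c.toNat = 87 ∨ c.toNat = 88 ∨ c.toNat = 89 ∨ c.toNat = 90 := by omega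
  rcases hd with h|h|h|h|h|h|h|h|h|h|h|h|h|h|h|h|h|h|h|h|h|h|h|h|h|h <;> (rw [h] at hc; rw [hc]; decide)

-- ===== VERDICT (by name: the statement is the Claim_ definition above) =====
theorem letras_validas_spec : Claim_equal_letras_validas := by
  intro palabra pozo _
  unfold Spec_letras_validas letras_validas letras_validas_alt
  have hcnt : ∀ (s : String) (c : Char),
      PySem.Str.count s (String.ofList [c]) = s.toList.count c := by
    intro s c
    have h1 : (String.ofList [c]).toList = [c] := by simp
    simp [h1, count_singleton]
  simp only [PySem.Str.len_eq, PySem.Chars.len_eq, hcnt, abc_eq,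
    PySem.Dict.foldl_insert_getD_add_one_eq_counter, PySem.List.foldl_ite_add_one,
    PySem.Dict.items_counter]
  by_cases hlen : palabra.toList.length ≤ pozo.toList.length
  · rw [if_pos (show ((palabra.toList.length : Int) ≤ (pozo.toList.length : Int)) from by exact_mod_cast hlen),
       if_neg (show ¬((palabra.toList.length : Int) > (pozo.toList.length : Int)) from by push_cast; omega)]
    by_cases hz : (abcLit.countP
        (fun x => decide (List.count x palabra.toList > List.count x pozo.toList))) = 0
    · have hall := List.countP_eq_zero.mp hz
      rw [hz, if_neg (by norm_num)]
      symm
      rw [List.all_eq_true]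
      rintro p hp
      rw [List.mem_filter] at hp
      obtain ⟨hp1, hp2⟩ := hp
      obtain ⟨ch, hch, rfl⟩ := List.mem_map.mp hp1
      simp only [Bool.and_eq_true, decide_eq_true_eq] at hp2 ⊢
      have := hall ch (mem_abc ch hp2.1 hp2.2)
      simp at this
      exact_mod_cast this
    · rw [if_pos (by omega)]
      symm
      rw [Bool.eq_false_iff]
      intro hall
      have hex : ∃ L ∈ abcLit, List.count L pozo.toList < List.count L palabra.toList := by
        by_contra hno
        push_neg at hno
        refine hz (List.countP_eq_zero.mpr ?_)
        intro a ha
        simpa using hno a ha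
      obtain ⟨L, hLabc, hviol⟩ := hex
      have hLP : L ∈ palabra.toList := by
        by_contra hmem
        simp [List.count_eq_zero_of_not_mem hmem] at hviol
      have hup := upper_of_mem_abc L hLabc
      have hmemf : (L, (List.count L palabra.toList : Int)) ∈
          (((PySem.Set.ofList palabra.toList).map
              (fun k => (k, (List.count k palabra.toList : Int)))).filter
            (fun p => decide ('A' ≤ p.1) && decide (p.1 ≤ 'Z'))) := by
        rw [List.mem_filter]
        refine ⟨List.mem_map.mpr ⟨L, (PySem.Set.mem_ofList _ _).mpr hLP, rfl⟩, ?_⟩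
        simp [hup.1, hup.2]
      have := List.all_eq_true.mp hall _ hmemf
      simp at this
      omega
  · rw [if_neg (show ¬((palabra.toList.length : Int) ≤ (pozo.toList.length : Int)) from by push_cast; omega),
       if_pos (show ((palabra.toList.length : Int) > (pozo.toList.length : Int)) from by push_cast; omega)]
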